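-- pv_equiv track=rewrite | github.com/rodrig20/rubiks-cube-solver | tools/get_zbll.py | get_alg_size
-- ===== SOURCE A (Python) =====
-- def get_alg_size(alg: str):
--     alg = alg.strip()
--     size = alg.count(" ") + 1
--     for char in alg:
--         if char in ["x", "y", "z"]:
--             size -= 1
--         elif char in ["M", "E", "S"]:
--             size += 1
--     return size
-- ===== SOURCE B (Python) =====
-- def _move_weight(token):
--     # one move, plus one per slice move, minus one per rotation in the token
--     w = 1
--     for c in "MES":
--         w += token.count(c)
--     for c in "xyz":
--         w -= token.count(c)
--     return w
--
-- def get_alg_size(alg: str):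
--     total = 0
--     for token in alg.strip().split(" "):
--         total += _move_weight(token)
--     return total
-- ===== Notes on version B (the rewrite author's own statement) =====
-- stated objective: faster
-- what changed: B tokenizes the stripped string into moves by splitting on single spaces and sums a per-token weight (1 plus slice letters minus rotation letters) computed with str.count, instead of A's spaces-count baseline adjusted by a per-character branching Python loop over the whole string.
import Mathlib
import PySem

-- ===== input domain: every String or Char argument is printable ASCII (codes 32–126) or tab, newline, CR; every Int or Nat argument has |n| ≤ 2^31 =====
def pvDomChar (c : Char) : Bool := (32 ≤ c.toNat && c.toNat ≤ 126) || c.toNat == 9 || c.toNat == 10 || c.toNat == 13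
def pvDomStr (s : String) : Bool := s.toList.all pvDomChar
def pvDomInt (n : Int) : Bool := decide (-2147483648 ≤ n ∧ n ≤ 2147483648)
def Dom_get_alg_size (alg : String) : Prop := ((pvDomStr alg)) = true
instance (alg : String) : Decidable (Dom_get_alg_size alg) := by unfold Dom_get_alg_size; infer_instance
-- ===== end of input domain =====

-- B tokenizes the stripped string into moves by splitting on single spaces and sums
-- a per-token weight via str.count, instead of A's spaces-count baseline plus a
-- per-character branching loop (objective: faster, measured constant-factor).

-- ===== PORT A =====
def get_alg_size (alg : String) : Int :=
  let alg := PySem.Str.strip alg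
  let size : Int := (PySem.Str.count alg " " : Int) + 1
  alg.toList.foldl
    (fun size char =>
      if char ∈ (['x', 'y', 'z'] : List Char) then size - 1
      else if char ∈ (['M', 'E', 'S'] : List Char) then size + 1
      else size)
    size

-- ===== PORT B =====
def moveWeight (token : String) : Int :=
  let w : Int := 1
  let w := ("MES".toList).foldl (fun w c => w + (PySem.Str.count token (String.ofList [c]) : Int)) w
  let w := ("xyz".toList).foldl (fun w c => w - (PySem.Str.count token (String.ofList [c]) : Int)) w
  w

def get_alg_size_alt (alg : String) : Int :=
  let total : Int := 0
  ((PySem.Str.split? (PySem.Str.strip alg) " ").getD []).foldl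
    (fun total token => total + moveWeight token) total

-- ===== PRECONDITION & SPEC =====
def Spec_get_alg_size (alg : String) (out : Int) : Prop := out = get_alg_size_alt alg
instance (alg : String) (out : Int) : Decidable (Spec_get_alg_size alg out) := by unfold Spec_get_alg_size; infer_instance

-- ===== CLAIM (what is proved, stated in full; the proofs are below) =====
def Claim_equal_get_alg_size : Prop := ∀ (alg : String), Dom_get_alg_size alg → Spec_get_alg_size alg (get_alg_size alg)

-- ===== LEMMAS AND PROOFS =====

-- reference splitter on a single space, used only in the proofs
def splitSp : List Char → List (List Char)
  | [] => [[]]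
  | c :: rest => if c = ' ' then [] :: splitSp rest else (splitSp rest).modifyHead (c :: ·)

theorem splitSp_ne_nil (l : List Char) : splitSp l ≠ [] := by
  induction l with
  | nil => simp [splitSp]
  | cons c rest ih =>
    simp only [splitSp]
    split_ifs
    · simp
    · cases h : splitSp rest with
      | nil => exact absurd h ih
      | cons t ts => simp [h]

theorem splitOn_go_eq (fuel : Nat) :
    ∀ (l cur : List Char) (acc : List (List Char)), l.length ≤ fuel →
      PySem.Chars.splitOn.go [' '] fuel l cur acc
        = acc.reverse ++ (splitSp l).modifyHead (cur.reverse ++ ·) := by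
  induction fuel with
  | zero =>
    intro l cur acc h
    have : l = [] := List.eq_nil_of_length_eq_zero (Nat.le_zero.mp h)
    subst this
    simp [PySem.Chars.splitOn.go, splitSp]
  | succ n ih =>
    intro l cur acc h
    cases l with
    | nil => simp [PySem.Chars.splitOn.go, splitSp]
    | cons c rest =>
      simp only [PySem.Chars.splitOn.go]
      by_cases hc : c = ' '
      · subst hc
        have hpre : List.isPrefixOf [' '] (' ' :: rest) = true := by simp [List.isPrefixOf]
        rw [if_pos hpre]
        simp only [List.length_cons] at h
        simp only [List.length_singleton, List.drop_succ_cons, List.drop_zero]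
        rw [ih rest [] _ (Nat.le_of_succ_le_succ h)]
        simp only [splitSp, if_pos rfl, List.reverse_cons, List.reverse_nil, List.nil_append,
          List.modifyHead, List.append_assoc, List.singleton_append, List.append_cancel_left_eq]
        cases splitSp rest <;> simp
      · have hpre : List.isPrefixOf [' '] (c :: rest) = false := by
          simp [List.isPrefixOf]
          exact fun hh => (hc hh.symm).elim
        rw [if_neg (by simp [hpre])]
        simp only [List.length_cons] at h
        rw [ih rest (c :: cur) acc (Nat.le_of_succ_le_succ h)]
        simp only [splitSp, if_neg hc]
        cases hsp : splitSp rest with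
        | nil => exact absurd hsp (splitSp_ne_nil rest)
        | cons t ts => simp

theorem splitOn_space (l : List Char) :
    PySem.Chars.splitOn l [' '] = splitSp l := by
  unfold PySem.Chars.splitOn
  rw [splitOn_go_eq (l.length + 1) l [] [] (Nat.le_succ _)]
  cases h : splitSp l with
  | nil => exact absurd h (splitSp_ne_nil l)
  | cons t ts => simp

theorem splitSp_length (l : List Char) :
    (splitSp l).length = l.count ' ' + 1 := by
  induction l with
  | nil => simp [splitSp]
  | cons c rest ih =>
    simp only [splitSp, List.count_cons]
    by_cases hc : c = ' '
    · subst hc; simp [ih]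
    · rw [if_neg hc]
      cases h : splitSp rest with
      | nil => exact absurd h (splitSp_ne_nil rest)
      | cons t ts =>
        rw [h] at ih
        simp only [List.modifyHead, List.length_cons] at *
        simpa [hc] using ih

theorem splitSp_count (c : Char) (hc : c ≠ ' ') (l : List Char) :
    ((splitSp l).map (fun t => t.count c)).sum = l.count c := by
  induction l with
  | nil => simp [splitSp]
  | cons a rest ih =>
    simp only [splitSp, List.count_cons]
    by_cases ha : a = ' '
    · subst ha
      simp [ih, (by simpa using hc : ¬ c = ' ')]
      intro h; exact absurd h.symm hc
    · rw [if_neg ha]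
      cases h : splitSp rest with
      | nil => exact absurd h (splitSp_ne_nil rest)
      | cons t ts =>
        rw [h] at ih
        simp only [List.modifyHead, List.map_cons, List.sum_cons, List.count_cons] at *
        omega

-- Python's s.count(needle) for a single-character needle is the character count.
theorem chars_count_go_singleton (c : Char) :
    ∀ (fuel : Nat) (l : List Char) (acc : Nat), l.length ≤ fuel →
      PySem.Chars.count.go [c] fuel l acc = acc + l.count c := by
  intro fuel
  induction fuel with
  | zero =>
    intro l acc h
    have : l = [] := List.eq_nil_of_length_eq_zero (Nat.le_zero.mp h)
    subst this
    simp [PySem.Chars.count.go]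
  | succ n ih =>
    intro l acc h
    cases l with
    | nil => simp [PySem.Chars.count.go]
    | cons hd t =>
      simp only [PySem.Chars.count.go]
      by_cases hc : hd = c
      · subst hc
        have hpre : List.isPrefixOf [hd] (hd :: t) = true := by
          simp [List.isPrefixOf]
        simp only [hpre, if_pos]
        rw [ih _ _ (by simpa using Nat.le_of_succ_le_succ h)]
        simp [List.count_cons]
        omega
      · have hpre : List.isPrefixOf [c] (hd :: t) = false := by
          simp [List.isPrefixOf]
          exact fun hh => (hc hh.symm).elim
        simp only [hpre]
        rw [if_neg (by simp [hpre])]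
        rw [ih _ _ (by simpa using Nat.le_of_succ_le_succ h)]
        simp [List.count_cons, hc]

theorem chars_count_singleton (l : List Char) (c : Char) :
    PySem.Chars.count l [c] = l.count c := by
  have h := chars_count_go_singleton c l.length l 0 (le_refl _)
  unfold PySem.Chars.count
  rw [if_neg (by simp)]
  simpa using h

theorem str_count_singleton (s : String) (c : Char) :
    PySem.Str.count s (String.ofList [c]) = s.toList.count c := by
  rw [PySem.Str.count_eq]
  have h1 : (String.ofList [c]).toList = [c] := by simp
  rw [h1, chars_count_singleton]

-- B's per-token weight as counts over the token's characters.
theorem moveWeight_eq (tok : String) :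
    moveWeight tok
      = 1 + ((tok.toList.count 'M' : Int) + tok.toList.count 'E' + tok.toList.count 'S')
          - ((tok.toList.count 'x' : Int) + tok.toList.count 'y' + tok.toList.count 'z') := by
  have hm : ("MES".toList) = ['M', 'E', 'S'] := by decide
  have hx : ("xyz".toList) = ['x', 'y', 'z'] := by decide
  unfold moveWeight
  rw [hm, hx]
  simp only [List.foldl_cons, List.foldl_nil, str_count_singleton]
  ring

-- A's loop adds (#M + #E + #S) and subtracts (#x + #y + #z).
theorem loopA_eq (l : List Char) : ∀ (s : Int),
    l.foldl
      (fun size char =>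
        if char ∈ (['x', 'y', 'z'] : List Char) then size - 1
        else if char ∈ (['M', 'E', 'S'] : List Char) then size + 1
        else size) s
    = s + ((l.count 'M' : Int) + l.count 'E' + l.count 'S')
        - ((l.count 'x' : Int) + l.count 'y' + l.count 'z') := by
  induction l with
  | nil => intro s; simp
  | cons hd t ih =>
    intro s
    simp only [List.foldl_cons, ih, List.count_cons]
    by_cases h1 : hd ∈ (['x', 'y', 'z'] : List Char)
    · rw [if_pos h1]
      fin_cases h1 <;> simp <;> push_cast <;> ring
    · rw [if_neg h1]
      by_cases h2 : hd ∈ (['M', 'E', 'S'] : List Char)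
      · rw [if_pos h2]
        fin_cases h2 <;> simp <;> push_cast <;> ring
      · rw [if_neg h2]
        simp only [List.mem_cons, List.mem_singleton] at h1 h2
        push_neg at h1 h2
        obtain ⟨hx, hy, hz⟩ := h1
        obtain ⟨hM, hE, hS⟩ := h2
        simp [hx, hy, hz, hM, hE, hS, beq_iff_eq]

-- summing moveWeight over a token list is a foldl with +
theorem foldl_moveWeight (ts : List String) : ∀ (t0 : Int),
    ts.foldl (fun total token => total + moveWeight token) t0
      = t0 + (ts.map moveWeight).sum := by
  induction ts with
  | nil => intro t0; simp
  | cons t rest ih => intro t0; simp [ih]; ring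

-- per-token integer weight used in the summations below
def tokWeight (t : List Char) : Int :=
  1 + ((t.count 'M' : Int) + t.count 'E' + t.count 'S')
    - ((t.count 'x' : Int) + t.count 'y' + t.count 'z')

theorem split_space_eq (s : String) :
    PySem.Str.split? s " " = some ((splitSp s.toList).map String.ofList) := by
  show Option.map _ (PySem.Chars.split? s.toList (" ".toList)) = _
  have h1 : (" ".toList) = [' '] := by decide
  rw [h1]
  simp only [PySem.Chars.split?, List.isEmpty_cons, Bool.false_eq_true, if_false, splitOn_space]
  rfl

theorem map_moveWeight_eq (ts : List (List Char)) :
    ((ts.map String.ofList).map moveWeight).sum = (ts.map tokWeight).sum := by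
  rw [List.map_map]
  congr 1
  apply List.map_congr_left
  intro t _
  simp only [Function.comp_apply, moveWeight_eq, String.toList_ofList, tokWeight]

theorem sum_tokWeight (ts : List (List Char)) :
    (ts.map tokWeight).sum
      = (ts.length : Int)
        + (((ts.map (fun t => (t.count 'M' : Int))).sum
           + (ts.map (fun t => (t.count 'E' : Int))).sum
           + (ts.map (fun t => (t.count 'S' : Int))).sum))
        - (((ts.map (fun t => (t.count 'x' : Int))).sum
           + (ts.map (fun t => (t.count 'y' : Int))).sum
           + (ts.map (fun t => (t.count 'z' : Int))).sum)) := by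
  induction ts with
  | nil => simp
  | cons t ts ih =>
    simp only [List.map_cons, List.sum_cons, List.length_cons, ih, tokWeight]
    push_cast
    ring

theorem sum_int_count (c : Char) (hc : c ≠ ' ') (l : List Char) :
    ((splitSp l).map (fun t => (t.count c : Int))).sum = (l.count c : Int) := by
  rw [← splitSp_count c hc l]
  induction splitSp l with
  | nil => simp
  | cons t ts ih =>
    simp only [List.map_cons, List.sum_cons, ih]
    push_cast
    ring

-- ===== VERDICT (by name: the statement is the Claim_ definition above) =====
theorem get_alg_size_spec : Claim_equal_get_alg_size := by
  intro alg _
  unfold Spec_get_alg_size get_alg_size get_alg_size_alt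
  rw [split_space_eq]
  simp only [Option.getD_some]
  rw [foldl_moveWeight, map_moveWeight_eq, sum_tokWeight, splitSp_length, loopA_eq,
      sum_int_count 'M' (by decide), sum_int_count 'E' (by decide),
      sum_int_count 'S' (by decide), sum_int_count 'x' (by decide),
      sum_int_count 'y' (by decide), sum_int_count 'z' (by decide)]
  have hcs : PySem.Str.count (PySem.Str.strip alg) " " = (PySem.Str.strip alg).toList.count ' ' := by
    have h1 : (" " : String) = String.ofList [' '] := rfl
    rw [h1, str_count_singleton]
  rw [hcs]
  push_cast
  ring
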